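-- pv_equiv track=rewrite | github.com/Glebhl/Glosium | ui/controllers/answer_precheck.py | expand_apostrophe_variants
-- ===== SOURCE A (Python) =====
-- from itertools import product
--
-- LANGUAGE_CONTRACTION_RULES: dict[str, dict[str, tuple[str, ...]]] = {
--     "en": {
--         "n't": (" not",),
--         "'re": (" are",),
--         "'ve": (" have",),
--         "'ll": (" will",),
--         "'m": (" am",),
--         "'d": (" would",),
--         "'s": (" is", ""),
--     },
-- }
--
-- def expand_apostrophe_variants(text: str, language_code: str) -> set[str]:
--     rules = LANGUAGE_CONTRACTION_RULES.get((language_code or "").casefold(), {})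
--     if not rules:
--         return set()
--
--     token_variants: list[list[str]] = []
--     for token in text.split():
--         token_variants.append(expand_token_variants(token, rules))
--
--     expanded_texts: set[str] = set()
--     for variant_tokens in product(*token_variants):
--         expanded_texts.add(" ".join(variant_tokens))
--
--     return expanded_texts
--
-- def expand_token_variants(
--     token: str,
--     rules: dict[str, tuple[str, ...]],
-- ) -> list[str]:
--     token_casefold = token.casefold()
--     variants = {token}
--
--     for suffix, replacements in rules.items():
--         if not token_casefold.endswith(suffix):
--             continue
--
--         token_stem = token[: len(token) - len(suffix)]
--         for replacement in replacements:
--             variants.add(f"{token_stem}{replacement}")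
--
--     return list(variants)
-- ===== SOURCE B (Python) =====
-- LANGUAGE_CONTRACTION_RULES: dict[str, dict[str, tuple[str, ...]]] = {
--     "en": {
--         "n't": (" not",),
--         "'re": (" are",),
--         "'ve": (" have",),
--         "'ll": (" will",),
--         "'m": (" am",),
--         "'d": (" would",),
--         "'s": (" is", ""),
--     },
-- }
--
--
-- def expand_apostrophe_variants(text: str, language_code: str) -> set[str]:
--     rules = LANGUAGE_CONTRACTION_RULES.get((language_code or "").casefold(), {})
--     if not rules:
--         return set()
--
--     # Index the rules by the final character of each suffix, so a token is
--     # checked only against the (at most two) rules that could match its last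
--     # character, instead of being scanned against the whole rules table.
--     by_last_char: dict[str, list[tuple[str, tuple[str, ...]]]] = {}
--     for suffix, replacements in rules.items():
--         by_last_char.setdefault(suffix[-1], []).append((suffix, replacements))
--
--     def token_variants(token: str) -> list[str]:
--         low = token.casefold()
--         out = [token]
--         for suffix, replacements in by_last_char.get(low[-1], []):
--             if low.endswith(suffix):
--                 stem = token[: len(token) - len(suffix)]
--                 out.extend(stem + r for r in replacements)
--         return out
--
--     # Recurse on the token list from the left: expansions of a sentence are
--     # each variant of the head glued onto each expansion of the tail.
--     def expand(tokens: list[str]) -> list[str]: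
--         if not tokens:
--             return [""]
--         if len(tokens) == 1:
--             return token_variants(tokens[0])
--         rest = expand(tokens[1:])
--         return [v + " " + r for v in token_variants(tokens[0]) for r in rest]
--
--     return set(expand(text.split()))
-- ===== Notes on version B (the rewrite author's own statement) =====
-- stated objective: alternative
-- what changed: B replaces A's scan-every-rule-per-token + itertools.product + ' '.join pipeline: it builds a hash index of the rules keyed by each suffix's final character once (so a token is checked only against the bucket for its own last character instead of the whole rules table), and it builds the sentence set by recursion on the token list (head variants glued onto tail expansions) instead of collecting variant lists and taking their product.
import Mathlib
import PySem

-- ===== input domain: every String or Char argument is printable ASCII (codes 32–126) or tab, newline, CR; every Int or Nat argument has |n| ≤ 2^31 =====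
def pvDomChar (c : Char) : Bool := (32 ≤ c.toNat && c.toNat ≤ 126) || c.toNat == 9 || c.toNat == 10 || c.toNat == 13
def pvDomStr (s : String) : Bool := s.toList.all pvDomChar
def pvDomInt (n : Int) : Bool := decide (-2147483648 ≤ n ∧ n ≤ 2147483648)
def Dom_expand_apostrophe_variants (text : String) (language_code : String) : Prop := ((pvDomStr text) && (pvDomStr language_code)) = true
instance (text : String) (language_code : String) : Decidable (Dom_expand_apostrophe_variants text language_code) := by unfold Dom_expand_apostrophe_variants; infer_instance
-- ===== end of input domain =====

-- B re-implements A with a different structure: it indexes the rules once by the final character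
-- of each suffix (so a token is checked only against the bucket for its own last character, not
-- scanned against the whole rules table) and builds the sentence set by recursion on the token
-- list (head variants glued onto tail expansions) instead of itertools.product + join.
-- (str.casefold is ported as lower: they coincide on the printable-ASCII input domain.)

-- ===== PORT A =====
-- LANGUAGE_CONTRACTION_RULES (module constant, shared by both programs)
def pvContractionRules : PySem.Dict String (List (String × List String)) :=
  PySem.Dict.ofList
    [("en", [("n't", [" not"]), ("'re", [" are"]), ("'ve", [" have"]), ("'ll", [" will"]),
             ("'m", [" am"]), ("'d", [" would"]), ("'s", [" is", ""])])]

-- helper expand_token_variants of A: variants = {token}; add stem+replacement for each matching rule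
def pvExpandTokenVariants (token : String) (rules : List (String × List String)) : List String :=
  let token_casefold := PySem.Str.lower token
  rules.foldl
    (fun variants sr =>
      if PySem.Str.endswith token_casefold sr.1 then
        let token_stem := PySem.Str.slice token none (some (PySem.Str.len token - PySem.Str.len sr.1))
        sr.2.foldl (fun vs replacement => PySem.Set.add vs (token_stem ++ replacement)) variants
      else variants)
    (PySem.Set.ofList [token])

-- itertools.product(*lists) over lists of strings (rightmost varies fastest)
def pvProduct (ls : List (List String)) : List (List String) :=
  match ls with
  | [] => [[]]
  | l :: rest => l.flatMap (fun x => (pvProduct rest).map (fun t => x :: t))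

def expand_apostrophe_variants (text : String) (language_code : String) : List String :=
  let rules := PySem.Dict.getD pvContractionRules
      (PySem.Str.lower (if language_code = "" then "" else language_code)) []
  if rules = [] then []
  else
    let token_variants :=
      (PySem.Str.split₀ text).foldl (fun acc token => acc ++ [pvExpandTokenVariants token rules]) []
    (pvProduct token_variants).foldl
      (fun expanded_texts variant_tokens => PySem.Set.add expanded_texts (PySem.Str.join " " variant_tokens))
      PySem.Set.empty

-- ===== PORT B =====
-- by_last_char: the rules indexed by the final character of each suffix
-- (setdefault(key, []).append(entry) is Dict.modify key [] (· ++ [entry]); rule suffixes are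
-- nonempty, so the pyGet? of suffix[-1] is exact — the none branch is unreachable)
def pvByLastChar (rules : List (String × List String)) : PySem.Dict Char (List (String × List String)) :=
  rules.foldl
    (fun d sr =>
      match PySem.Str.pyGet? sr.1 (-1) with
      | some c => PySem.Dict.modify d c [] (· ++ [sr])
      | none => d)
    PySem.Dict.empty

-- token_variants of B: look up only the bucket for the token's last character
-- (tokens produced by split() are nonempty, so low[-1] is exact — the none branch is unreachable)
def pvTokenVariantsB (token : String) (byLast : PySem.Dict Char (List (String × List String))) : List String :=
  let low := PySem.Str.lower token
  match PySem.Str.pyGet? low (-1) with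
  | none => [token]
  | some c =>
      (PySem.Dict.getD byLast c []).foldl
        (fun out sr =>
          if PySem.Str.endswith low sr.1 then
            let stem := PySem.Str.slice token none (some (PySem.Str.len token - PySem.Str.len sr.1))
            out ++ sr.2.map (fun r => stem ++ r)
          else out)
        [token]

-- expand of B: recursion on the token list — variants of the head glued onto expansions of the tail
def pvExpandRec (byLast : PySem.Dict Char (List (String × List String))) : List String → List String
  | [] => [""]
  | [t] => pvTokenVariantsB t byLast
  | t :: rest =>
      let r := pvExpandRec byLast rest
      (pvTokenVariantsB t byLast).flatMap (fun v => r.map (fun s => v ++ " " ++ s))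

def expand_apostrophe_variants_alt (text : String) (language_code : String) : List String :=
  let rules := PySem.Dict.getD pvContractionRules
      (PySem.Str.lower (if language_code = "" then "" else language_code)) []
  if rules = [] then []
  else
    let byLast := pvByLastChar rules
    PySem.Set.ofList (pvExpandRec byLast (PySem.Str.split₀ text))

-- ===== PRECONDITION & SPEC =====
-- A is TOTAL: Pre_ excludes NO input. It only names the two-way split every input falls into —
-- either the (casefolded) language code is "en", or the rules lookup falls back to the empty
-- table {} (A's early `return set()` path) — which is exactly the case split the proof makes.
def Pre_expand_apostrophe_variants (text : String) (language_code : String) : Prop :=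
  PySem.Str.lower (if language_code = "" then "" else language_code) = "en"
  ∨ PySem.Dict.getD pvContractionRules
      (PySem.Str.lower (if language_code = "" then "" else language_code)) [] = []
instance (text : String) (language_code : String) : Decidable (Pre_expand_apostrophe_variants text language_code) := by unfold Pre_expand_apostrophe_variants; infer_instance

def pvWitness_expand_apostrophe_variants : String × String := ("it's a cat", "en")

def Spec_expand_apostrophe_variants (text : String) (language_code : String) (out : List String) : Prop := out = expand_apostrophe_variants_alt text language_code
instance (text : String) (language_code : String) (out : List String) : Decidable (Spec_expand_apostrophe_variants text language_code out) := by unfold Spec_expand_apostrophe_variants; infer_instance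

-- ===== CLAIM (what is proved, stated in full; the proofs are below) =====
def Claim_equal_expand_apostrophe_variants : Prop := ∀ (text : String) (language_code : String), Dom_expand_apostrophe_variants text language_code → Pre_expand_apostrophe_variants text language_code → Spec_expand_apostrophe_variants text language_code (expand_apostrophe_variants text language_code)

-- ===== LEMMAS AND PROOFS =====

-- the plain full scan of the rules (proof-only: the common shape both helpers are reduced to)
def pvScanVariants (token : String) (rules : List (String × List String)) : List String :=
  let low := PySem.Str.lower token
  rules.foldl
    (fun out sr =>
      if PySem.Str.endswith low sr.1 then
        let stem := PySem.Str.slice token none (some (PySem.Str.len token - PySem.Str.len sr.1))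
        out ++ sr.2.map (fun r => stem ++ r)
      else out)
    [token]

-- membership monotonicity of the Set.add fold
theorem pv_mem_foldl_add_left {α : Type} [BEq α] [LawfulBEq α] (l : List α) (s : PySem.Set α)
    (a : α) (h : a ∈ s) : a ∈ l.foldl PySem.Set.add s := by
  induction l generalizing s with
  | nil => exact h
  | cons x l ih =>
      exact ih _ (by rw [PySem.Set.mem_add]; exact Or.inl h)

theorem pv_mem_foldl_add {α : Type} [BEq α] [LawfulBEq α] (l : List α) (s : PySem.Set α)
    (a : α) (h : a ∈ l) : a ∈ l.foldl PySem.Set.add s := by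
  induction l generalizing s with
  | nil => cases h
  | cons x l ih =>
      rw [List.foldl_cons]
      rcases List.mem_cons.mp h with h | h
      · subst h
        exact pv_mem_foldl_add_left l (PySem.Set.add s a) a ((PySem.Set.mem_add s a a).mpr (Or.inr rfl))
      · exact ih _ h

theorem pv_add_of_mem {α : Type} [BEq α] [LawfulBEq α] (s : PySem.Set α) (a : α) (h : a ∈ s) :
    PySem.Set.add s a = s := by
  simp [PySem.Set.add, List.contains_eq_mem, h]

theorem pv_foldl_add_eq_self {α : Type} [BEq α] [LawfulBEq α] (l : List α) (s : PySem.Set α)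
    (h : ∀ a ∈ l, a ∈ s) : l.foldl PySem.Set.add s = s := by
  induction l generalizing s with
  | nil => rfl
  | cons x l ih =>
      rw [List.foldl_cons, pv_add_of_mem _ _ (h x (by simp))]
      exact ih _ (fun a ha => h a (by simp [ha]))

-- dedup commutes out of a flatMap: folding Set.add over (dedup xs).flatMap f equals folding over xs.flatMap f
theorem pv_foldl_add_dedup_flatMap {α β : Type} [BEq α] [LawfulBEq α] [BEq β] [LawfulBEq β]
    (xs : List α) (f : α → List β) (s : PySem.Set β) :
    ((PySem.List.dedup xs).flatMap f).foldl PySem.Set.add s = (xs.flatMap f).foldl PySem.Set.add s := by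
  induction xs using List.reverseRecOn generalizing s with
  | nil => rfl
  | append_singleton xs x ih =>
      have hd : PySem.List.dedup (xs ++ [x]) = PySem.Set.add (PySem.List.dedup xs) x := by
        simp only [PySem.List.dedup_eq_ofList]
        simp [PySem.Set.ofList, List.foldl_append]
      by_cases hx : x ∈ PySem.List.dedup xs
      · rw [hd, pv_add_of_mem _ _ hx, ih]
        rw [List.flatMap_append, List.foldl_append, List.flatMap_singleton]
        exact (pv_foldl_add_eq_self (f x) _ (fun a ha =>
          pv_mem_foldl_add _ _ _ (List.mem_flatMap.mpr ⟨x, (PySem.List.mem_dedup xs x).mp hx, ha⟩))).symm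
      · rw [hd]
        have hx' : x ∉ xs := fun h => hx ((PySem.List.mem_dedup xs x).mpr h)
        have hadd : PySem.Set.add (PySem.List.dedup xs) x = PySem.List.dedup xs ++ [x] := by
          simp [PySem.Set.add, List.contains_eq_mem, hx']
        rw [hadd, List.flatMap_append, List.flatMap_append, List.foldl_append, List.foldl_append, ih]

theorem pv_dedup_flatMap (xs : List String) (f : String → List String) :
    PySem.Set.ofList ((PySem.List.dedup xs).flatMap f) = PySem.Set.ofList (xs.flatMap f) := by
  simp only [PySem.Set.ofList]
  exact pv_foldl_add_dedup_flatMap xs f PySem.Set.empty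

theorem pv_foldl_add_dedup_map {α β : Type} [BEq α] [LawfulBEq α] [BEq β] [LawfulBEq β]
    (xs : List α) (h : α → β) (s : PySem.Set β) :
    ((PySem.List.dedup xs).map h).foldl PySem.Set.add s = (xs.map h).foldl PySem.Set.add s := by
  have := pv_foldl_add_dedup_flatMap xs (fun x => [h x]) s
  simpa only [← List.map_eq_flatMap] using this

-- Set.ofList over an append folds the tail in
theorem pv_ofList_append {α : Type} [BEq α] (xs ys : List α) :
    PySem.Set.ofList (xs ++ ys) = ys.foldl PySem.Set.add (PySem.Set.ofList xs) := by
  simp [PySem.Set.ofList, List.foldl_append]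

-- generic shape of the two token-variant helpers: Set.add-folds vs list appends
theorem pv_fold_add_vs_append {α : Type} [BEq α] (rules : List (String × List String))
    (c : String → Bool) (g : String × List String → String → α) :
    ∀ l : List α,
      rules.foldl (fun variants sr =>
          if c sr.1 then sr.2.foldl (fun vs r => PySem.Set.add vs (g sr r)) variants else variants)
        (PySem.Set.ofList l)
      = PySem.Set.ofList (rules.foldl (fun out sr =>
          if c sr.1 then out ++ sr.2.map (fun r => g sr r) else out) l) := by
  induction rules with
  | nil => intro l; rfl
  | cons sr rules ih =>
      intro l
      simp only [List.foldl_cons]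
      by_cases hc : c sr.1 = true
      · rw [if_pos hc, if_pos hc]
        have : sr.2.foldl (fun vs r => PySem.Set.add vs (g sr r)) (PySem.Set.ofList l)
            = PySem.Set.ofList (l ++ sr.2.map (fun r => g sr r)) := by
          rw [pv_ofList_append, List.foldl_map]
        rw [this]; exact ih _
      · rw [if_neg hc, if_neg hc]; exact ih _

-- A's per-token set of variants is the plain full scan deduplicated
theorem pv_token_variants_eq (token : String) (rules : List (String × List String)) :
    pvExpandTokenVariants token rules = PySem.Set.ofList (pvScanVariants token rules) := by
  simp only [pvExpandTokenVariants, pvScanVariants]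
  exact pv_fold_add_vs_append rules (fun sfx => PySem.Str.endswith (PySem.Str.lower token) sfx)
    (fun sr r => PySem.Str.slice token none (some (PySem.Str.len token - PySem.Str.len sr.1)) ++ r) [token]

-- deduplication is idempotent for Set.ofList
theorem pv_dedup_dedup (xs : List String) :
    PySem.Set.ofList (PySem.List.dedup xs) = PySem.Set.ofList xs := by
  have := pv_dedup_flatMap xs (fun x => [x])
  simpa only [← List.map_eq_flatMap, List.map_id_fun', List.map_id] using this

-- ----- proof-only combinators describing the running "partial sentence" lists -----

-- one token step: every prefix extended by every variant
def pvStep (vs : List String) (X : List String) : List String :=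
  X.flatMap (fun p => vs.map (fun v => p ++ " " ++ v))

-- running product over a list of per-token variant lists
def pvF (X : List String) (ls : List (List String)) : List String :=
  ls.foldl (fun X l => pvStep l X) X

-- a sentence from a starting prefix and remaining chosen variants
def pvSent (p : String) (t : List String) : String :=
  t.foldl (fun a v => a ++ " " ++ v) p

theorem pv_sent_append (t : List String) : ∀ p a : String, p ++ pvSent a t = pvSent (p ++ a) t := by
  induction t with
  | nil => intro p a; rfl
  | cons v t ih =>
      intro p a
      show p ++ pvSent (a ++ " " ++ v) t = pvSent (p ++ a ++ " " ++ v) t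
      rw [ih p (a ++ " " ++ v)]
      congr 1
      simp [String.append_assoc]

-- Python's " ".join of a nonempty tuple is a left fold over its tail
theorem pv_join_eq_sent (t : List String) : ∀ x : String, PySem.Str.join " " (x :: t) = pvSent x t := by
  induction t with
  | nil =>
      intro x
      show String.ofList (PySem.Chars.join " ".toList [x.toList]) = x
      rw [PySem.Chars.join_singleton, String.ofList_toList]
  | cons y t ih =>
      intro x
      have hcc : PySem.Str.join " " (x :: y :: t) = x ++ " " ++ PySem.Str.join " " (y :: t) := by
        show String.ofList (PySem.Chars.join " ".toList (x.toList :: y.toList :: t.map String.toList)) = _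
        rw [PySem.Chars.join_cons_cons, String.ofList_append, String.ofList_append,
            String.ofList_toList]
        rfl
      rw [hcc, ih y, pv_sent_append t (x ++ " ") y]
      rfl

-- the running product in closed form: pvF is a flatMap over itertools.product
theorem pv_F_eq_flatMap_product (ls : List (List String)) :
    ∀ X : List String, pvF X ls = X.flatMap (fun p => (pvProduct ls).map (pvSent p)) := by
  induction ls with
  | nil =>
      intro X
      show X = X.flatMap (fun p => [pvSent p []])
      simp [pvSent]
  | cons l ls ih =>
      intro X
      show pvF (pvStep l X) ls = _
      rw [ih]
      simp only [pvStep, pvProduct, List.flatMap_assoc, List.map_flatMap, List.flatMap_map,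
        List.map_map]
      rfl

-- A's joined product over token-variant lists is the running product pvF
theorem pv_join_product (l : List String) (ls : List (List String)) :
    (pvProduct (l :: ls)).map (PySem.Str.join " ") = pvF l ls := by
  rw [pv_F_eq_flatMap_product]
  show (l.flatMap fun x => (pvProduct ls).map (fun t => x :: t)).map (PySem.Str.join " ") = _
  simp only [List.map_flatMap, List.map_map]
  refine List.flatMap_congr (fun x _ => ?_)
  exact List.map_congr_left (fun t _ => pv_join_eq_sent t x)

-- dedup of a step does not depend on dedup of its inputs
theorem pv_dedup_step_left (vs X : List String) :
    PySem.Set.ofList (pvStep vs (PySem.List.dedup X)) = PySem.Set.ofList (pvStep vs X) := by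
  exact pv_dedup_flatMap X _

theorem pv_foldl_add_step_dedup (vs : List String) :
    ∀ (X : List String) (s : PySem.Set String),
      (pvStep (PySem.List.dedup vs) X).foldl PySem.Set.add s = (pvStep vs X).foldl PySem.Set.add s := by
  intro X
  induction X with
  | nil => intro s; rfl
  | cons p X ih =>
      intro s
      show ((PySem.List.dedup vs).map _ ++ pvStep (PySem.List.dedup vs) X).foldl PySem.Set.add s = ((vs.map _) ++ pvStep vs X).foldl PySem.Set.add s
      rw [List.foldl_append, List.foldl_append, pv_foldl_add_dedup_map, ih]

theorem pv_dedup_step_right (vs X : List String) :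
    PySem.Set.ofList (pvStep (PySem.List.dedup vs) X) = PySem.Set.ofList (pvStep vs X) := by
  simp only [PySem.Set.ofList]
  exact pv_foldl_add_step_dedup vs X PySem.Set.empty

-- congruence: pvF only depends on the prefix list up to dedup
theorem pv_F_congr (ls : List (List String)) :
    ∀ X Y : List String, PySem.Set.ofList X = PySem.Set.ofList Y →
      PySem.Set.ofList (pvF X ls) = PySem.Set.ofList (pvF Y ls) := by
  induction ls with
  | nil => intro X Y h; exact h
  | cons l ls ih =>
      intro X Y h
      refine ih _ _ ?_
      calc PySem.Set.ofList (pvStep l X)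
          = PySem.Set.ofList (pvStep l (PySem.List.dedup X)) := (pv_dedup_step_left l X).symm
        _ = PySem.Set.ofList (pvStep l (PySem.List.dedup Y)) := by
              simp only [PySem.List.dedup_eq_ofList, h]
        _ = PySem.Set.ofList (pvStep l Y) := pv_dedup_step_left l Y

-- all per-token dedups can be stripped under the outer dedup
theorem pv_F_dedup_tokens (ls : List (List String)) :
    ∀ X : List String,
      PySem.Set.ofList (pvF X (ls.map PySem.List.dedup)) = PySem.Set.ofList (pvF X ls) := by
  induction ls with
  | nil => intro X; rfl
  | cons l ls ih =>
      intro X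
      show PySem.Set.ofList (pvF (pvStep (PySem.List.dedup l) X) (ls.map PySem.List.dedup)) = PySem.Set.ofList (pvF (pvStep l X) ls)
      rw [ih]
      exact pv_F_congr ls _ _ (pv_dedup_step_right l X)

-- A's result-set fold is Set.ofList of the joined product
theorem pv_foldl_add_join (L : List (List String)) :
    L.foldl (fun s vt => PySem.Set.add s (PySem.Str.join " " vt)) PySem.Set.empty
      = PySem.Set.ofList (L.map (PySem.Str.join " ")) := by
  simp only [PySem.Set.ofList, List.foldl_map]


-- ----- B-specific lemmas: the last-character index agrees with the full rule scan -----

-- the "en" rules table as a list literal (proof-only name for the table both ports look up)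
def pvRulesEn : List (String × List String) :=
  [("n't", [" not"]), ("'re", [" are"]), ("'ve", [" have"]), ("'ll", [" will"]),
   ("'m", [" am"]), ("'d", [" would"]), ("'s", [" is", ""])]

-- the index B builds from the "en" table, as a literal
def pvBLCEn : PySem.Dict Char (List (String × List String)) :=
  PySem.Dict.mk [('t', [("n't", [" not"])]), ('e', [("'re", [" are"]), ("'ve", [" have"])]),
    ('l', [("'ll", [" will"])]), ('m', [("'m", [" am"])]), ('d', [("'d", [" would"])]),
    ('s', [("'s", [" is", ""])])]

theorem pv_byLastChar_en : pvByLastChar pvRulesEn = pvBLCEn := by decide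

-- endswith is false when the last characters disagree
theorem pv_endswith_ne_last (low sfx : String) (d : Char) (hd : sfx.toList.getLast? = some d)
    (h : low.toList.getLast? ≠ some d) : PySem.Str.endswith low sfx = false := by
  rw [PySem.Str.endswith_eq]
  by_contra hc
  rw [Bool.not_eq_false, PySem.Chars.endswith_iff] at hc
  obtain ⟨t, ht⟩ := hc
  apply h
  rw [← ht, List.getLast?_append, hd]
  rfl

-- every token produced by split() is a nonempty string
theorem pv_split₀_go_ne_nil (s : List Char) : ∀ (cur : List Char) (acc : List (List Char)),
    (∀ x ∈ acc, x ≠ []) → ∀ t ∈ PySem.Chars.split₀.go s cur acc, t ≠ [] := by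
  induction s with
  | nil =>
      intro cur acc hacc t ht
      unfold PySem.Chars.split₀.go at ht
      by_cases hcur : cur.isEmpty = true
      · rw [if_pos hcur] at ht
        exact hacc t (List.mem_reverse.mp ht)
      · rw [if_neg hcur] at ht
        rcases List.mem_cons.mp (List.mem_reverse.mp ht) with h | h
        · subst h
          simpa [List.isEmpty_iff] using hcur
        · exact hacc t h
  | cons c rest ih =>
      intro cur acc hacc t ht
      unfold PySem.Chars.split₀.go at ht
      by_cases hsp : PySem.Chars.isspace c = true
      · rw [if_pos hsp] at ht
        by_cases hcur : cur.isEmpty = true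
        · rw [if_pos hcur] at ht; exact ih [] acc hacc t ht
        · rw [if_neg hcur] at ht
          refine ih [] _ ?_ t ht
          intro x hx
          rcases List.mem_cons.mp hx with h | h
          · subst h; simpa [List.isEmpty_iff] using hcur
          · exact hacc x h
      · rw [if_neg hsp] at ht
        exact ih (c :: cur) acc hacc t ht

theorem pv_split₀_tok_ne_nil (text : String) (t : String) (ht : t ∈ PySem.Str.split₀ text) :
    t.toList ≠ [] := by
  have : t.toList ∈ PySem.Chars.split₀ text.toList := by
    rw [← PySem.Str.split₀_map_toList]
    exact List.mem_map_of_mem ht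
  exact pv_split₀_go_ne_nil text.toList [] [] (by simp) t.toList this

-- the bucket lookup plus suffix checks equals the full scan of the rules
theorem pv_variantsB_eq_scan (token : String) (hne : token.toList ≠ []) :
    pvTokenVariantsB token pvBLCEn = pvScanVariants token pvRulesEn := by
  simp only [pvTokenVariantsB, pvScanVariants]
  set low := PySem.Str.lower token with hlow
  have hlownil : low.toList ≠ [] := by
    rw [hlow, PySem.Str.toList_lower, PySem.Chars.lower]
    simpa using hne
  cases hlast : low.toList.getLast? with
  | none => exact absurd (List.getLast?_eq_none_iff.mp hlast) hlownil
  | some ch =>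
  have hget : PySem.Str.pyGet? low (-1) = some ch := by
    rw [PySem.Str.pyGet?_eq]
    show PySem.List.pyGet? low.toList (-1) = some ch
    rw [PySem.List.pyGet?_neg_one, hlast]
  rw [hget]
  dsimp only
  have hfalse : ∀ (sfx : String) (d : Char), sfx.toList.getLast? = some d → ch ≠ d →
      PySem.Str.endswith low sfx = false := by
    intro sfx d hd hne'
    exact pv_endswith_ne_last low sfx d hd (by rw [hlast]; simp [hne'])
  -- reduce both folds to folds over the endswith-filtered entries
  rw [show (PySem.Dict.getD pvBLCEn ch []).foldl
        (fun out sr =>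
          if PySem.Str.endswith low sr.1 = true then
            out ++ sr.2.map (fun r => PySem.Str.slice token none (some (PySem.Str.len token - PySem.Str.len sr.1)) ++ r)
          else out) [token]
      = ((PySem.Dict.getD pvBLCEn ch []).filter (fun sr => PySem.Str.endswith low sr.1)).foldl
        (fun out sr =>
          out ++ sr.2.map (fun r => PySem.Str.slice token none (some (PySem.Str.len token - PySem.Str.len sr.1)) ++ r)) [token]
      from List.foldl_filter.symm]
  rw [show pvRulesEn.foldl
        (fun out sr =>
          if PySem.Str.endswith low sr.1 = true then
            out ++ sr.2.map (fun r => PySem.Str.slice token none (some (PySem.Str.len token - PySem.Str.len sr.1)) ++ r)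
          else out) [token]
      = (pvRulesEn.filter (fun sr => PySem.Str.endswith low sr.1)).foldl
        (fun out sr =>
          out ++ sr.2.map (fun r => PySem.Str.slice token none (some (PySem.Str.len token - PySem.Str.len sr.1)) ++ r)) [token]
      from List.foldl_filter.symm]
  congr 1
  -- the filtered bucket equals the filtered full table, by cases on the token's last character
  by_cases h1 : ch = 't'
  · subst h1
    have e2 := hfalse "'re" 'e' (by decide) (by decide)
    have e3 := hfalse "'ve" 'e' (by decide) (by decide)
    have e4 := hfalse "'ll" 'l' (by decide) (by decide)
    have e5 := hfalse "'m" 'm' (by decide) (by decide)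
    have e6 := hfalse "'d" 'd' (by decide) (by decide)
    have e7 := hfalse "'s" 's' (by decide) (by decide)
    simp at e2 e3 e4 e5 e6 e7
    simp [pvRulesEn, pvBLCEn, PySem.Dict.getD, PySem.Dict.get?, List.filter, e2, e3, e4, e5, e6, e7]
  by_cases h2 : ch = 'e'
  · subst h2
    have e1 := hfalse "n't" 't' (by decide) (by decide)
    have e4 := hfalse "'ll" 'l' (by decide) (by decide)
    have e5 := hfalse "'m" 'm' (by decide) (by decide)
    have e6 := hfalse "'d" 'd' (by decide) (by decide)
    have e7 := hfalse "'s" 's' (by decide) (by decide)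
    simp at e1 e4 e5 e6 e7
    simp [pvRulesEn, pvBLCEn, PySem.Dict.getD, PySem.Dict.get?, List.filter, e1, e4, e5, e6, e7]
  by_cases h3 : ch = 'l'
  · subst h3
    have e1 := hfalse "n't" 't' (by decide) (by decide)
    have e2 := hfalse "'re" 'e' (by decide) (by decide)
    have e3 := hfalse "'ve" 'e' (by decide) (by decide)
    have e5 := hfalse "'m" 'm' (by decide) (by decide)
    have e6 := hfalse "'d" 'd' (by decide) (by decide)
    have e7 := hfalse "'s" 's' (by decide) (by decide)
    simp at e1 e2 e3 e5 e6 e7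
    simp [pvRulesEn, pvBLCEn, PySem.Dict.getD, PySem.Dict.get?, List.filter, e1, e2, e3, e5, e6, e7]
  by_cases h4 : ch = 'm'
  · subst h4
    have e1 := hfalse "n't" 't' (by decide) (by decide)
    have e2 := hfalse "'re" 'e' (by decide) (by decide)
    have e3 := hfalse "'ve" 'e' (by decide) (by decide)
    have e4 := hfalse "'ll" 'l' (by decide) (by decide)
    have e6 := hfalse "'d" 'd' (by decide) (by decide)
    have e7 := hfalse "'s" 's' (by decide) (by decide)
    simp at e1 e2 e3 e4 e6 e7
    simp [pvRulesEn, pvBLCEn, PySem.Dict.getD, PySem.Dict.get?, List.filter, e1, e2, e3, e4, e6, e7]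
  by_cases h5 : ch = 'd'
  · subst h5
    have e1 := hfalse "n't" 't' (by decide) (by decide)
    have e2 := hfalse "'re" 'e' (by decide) (by decide)
    have e3 := hfalse "'ve" 'e' (by decide) (by decide)
    have e4 := hfalse "'ll" 'l' (by decide) (by decide)
    have e5 := hfalse "'m" 'm' (by decide) (by decide)
    have e7 := hfalse "'s" 's' (by decide) (by decide)
    simp at e1 e2 e3 e4 e5 e7
    simp [pvRulesEn, pvBLCEn, PySem.Dict.getD, PySem.Dict.get?, List.filter, e1, e2, e3, e4, e5, e7]
  by_cases h6 : ch = 's'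
  · subst h6
    have e1 := hfalse "n't" 't' (by decide) (by decide)
    have e2 := hfalse "'re" 'e' (by decide) (by decide)
    have e3 := hfalse "'ve" 'e' (by decide) (by decide)
    have e4 := hfalse "'ll" 'l' (by decide) (by decide)
    have e5 := hfalse "'m" 'm' (by decide) (by decide)
    have e6 := hfalse "'d" 'd' (by decide) (by decide)
    simp at e1 e2 e3 e4 e5 e6
    simp [pvRulesEn, pvBLCEn, PySem.Dict.getD, PySem.Dict.get?, List.filter, e1, e2, e3, e4, e5, e6]
  · have e1 := hfalse "n't" 't' (by decide) h1
    have e2 := hfalse "'re" 'e' (by decide) h2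
    have e3 := hfalse "'ve" 'e' (by decide) h2
    have e4 := hfalse "'ll" 'l' (by decide) h3
    have e5 := hfalse "'m" 'm' (by decide) h4
    have e6 := hfalse "'d" 'd' (by decide) h5
    have e7 := hfalse "'s" 's' (by decide) h6
    simp at e2 e3 e4 e5 e6 e7
    simp [pvRulesEn, pvBLCEn, PySem.Dict.getD, PySem.Dict.get?, List.filter,
      Ne.symm h1, Ne.symm h2, Ne.symm h3, Ne.symm h4, Ne.symm h5, Ne.symm h6,
      e2, e3, e4, e5, e6, e7]
    rw [show PySem.Chars.endswith low.toList ['n', '\'', 't'] = PySem.Str.endswith low "n't" from rfl, e1]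

-- ----- B's recursion computes the joined itertools.product -----

theorem pv_join_cons_cons (x y : String) (t : List String) :
    PySem.Str.join " " (x :: y :: t) = x ++ " " ++ PySem.Str.join " " (y :: t) := by
  show String.ofList (PySem.Chars.join " ".toList (x.toList :: y.toList :: t.map String.toList)) = _
  rw [PySem.Chars.join_cons_cons, String.ofList_append, String.ofList_append, String.ofList_toList]
  rfl

theorem pv_product_mem_ne_nil (l : List String) (ls : List (List String)) :
    ∀ t ∈ pvProduct (l :: ls), t ≠ [] := by
  intro t ht
  simp only [pvProduct, List.mem_flatMap, List.mem_map] at ht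
  obtain ⟨x, _, u, _, hu⟩ := ht
  rw [← hu]
  simp

theorem pv_expandRec_eq (tokens : List String) (hne : ∀ t ∈ tokens, t.toList ≠ []) :
    pvExpandRec pvBLCEn tokens
      = (pvProduct (tokens.map (fun t => pvScanVariants t pvRulesEn))).map (PySem.Str.join " ") := by
  induction tokens with
  | nil => rfl
  | cons t rest ih =>
      cases rest with
      | nil =>
          show pvTokenVariantsB t pvBLCEn = _
          rw [pv_variantsB_eq_scan t (hne t (by simp))]
          show _ = ((pvScanVariants t pvRulesEn).flatMap
            (fun x => ([([] : List String)]).map (fun u => x :: u))).map (PySem.Str.join " ")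
          simp only [List.map_singleton, ← List.map_eq_flatMap, List.map_map]
          symm
          refine (List.map_congr_left fun x _ => ?_).trans (List.map_id _)
          show String.ofList (PySem.Chars.join " ".toList [x.toList]) = x
          rw [PySem.Chars.join_singleton, String.ofList_toList]
      | cons t' rest' =>
          show (pvTokenVariantsB t pvBLCEn).flatMap
              (fun v => (pvExpandRec pvBLCEn (t' :: rest')).map (fun s => v ++ " " ++ s)) = _
          rw [pv_variantsB_eq_scan t (hne t (by simp)),
              ih (fun x hx => hne x (List.mem_cons_of_mem t hx))]
          show _ = ((pvScanVariants t pvRulesEn).flatMap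
            (fun x => (pvProduct ((t' :: rest').map (fun u => pvScanVariants u pvRulesEn))).map
              (fun u => x :: u))).map (PySem.Str.join " ")
          simp only [List.map_flatMap, List.map_map]
          refine List.flatMap_congr (fun v _ => ?_)
          refine List.map_congr_left (fun u hu => ?_)
          have hu' : u ≠ [] := pv_product_mem_ne_nil _ _ u hu
          show v ++ " " ++ PySem.Str.join " " u = PySem.Str.join " " (v :: u)
          cases u with
          | nil => exact absurd rfl hu'
          | cons a u' => exact (pv_join_cons_cons v a u').symm

-- dropping the per-token dedups under the outer set
theorem pv_set_product_dedup (Ls : List (List String)) :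
    PySem.Set.ofList ((pvProduct (Ls.map PySem.List.dedup)).map (PySem.Str.join " "))
      = PySem.Set.ofList ((pvProduct Ls).map (PySem.Str.join " ")) := by
  cases Ls with
  | nil => rfl
  | cons l ls =>
      rw [List.map_cons, pv_join_product, pv_join_product, pv_F_dedup_tokens]
      exact pv_F_congr ls _ _ (by rw [PySem.List.dedup_eq_ofList]; exact pv_dedup_dedup l)

-- ===== VERDICT (by name: the statement is the Claim_ definition above) =====
theorem expand_apostrophe_variants_spec : Claim_equal_expand_apostrophe_variants := by
  intro text language_code _ hpre
  unfold Spec_expand_apostrophe_variants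
  simp only [expand_apostrophe_variants, expand_apostrophe_variants_alt]
  rcases hpre with hen | h
  case inr => rw [if_pos h, if_pos h]
  case inl =>
    have h : ¬ PySem.Dict.getD pvContractionRules
        (PySem.Str.lower (if language_code = "" then "" else language_code)) [] = [] := by
      rw [hen]; decide
    rw [if_neg h, if_neg h]
    have hrules : PySem.Dict.getD pvContractionRules
        (PySem.Str.lower (if language_code = "" then "" else language_code)) [] = pvRulesEn := by
      rw [hen]; decide
    rw [hrules, pv_byLastChar_en,
        PySem.List.foldl_append_singleton_eq_map, List.nil_append, pv_foldl_add_join,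
        pv_expandRec_eq (PySem.Str.split₀ text) (fun t ht => pv_split₀_tok_ne_nil text t ht)]
    have hmapA : (PySem.Str.split₀ text).map (fun t => pvExpandTokenVariants t pvRulesEn)
        = ((PySem.Str.split₀ text).map (fun t => pvScanVariants t pvRulesEn)).map PySem.List.dedup := by
      rw [List.map_map]
      refine List.map_congr_left (fun t _ => ?_)
      rw [Function.comp_apply, PySem.List.dedup_eq_ofList]
      exact pv_token_variants_eq t pvRulesEn
    rw [hmapA, pv_set_product_dedup]
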